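-- pv_equiv track=rewrite | github.com/Niu-M/shujvjiegou2 | shujvjiegouyvsuanfa/test7.py | f01
-- ===== SOURCE A (Python) =====
-- def f01(nums):
--
--
--     a = sum(nums)
--
--     if a%3==0:
--         return a
--
--     mo = a % 3
--
--     mo_1 = []
--     mo_2 = []
--
--     for n in nums:
--         if n%3 == 1:
--             mo_1.append(n)
--         elif n%3 == 2:
--             mo_2.append(n)
--     mo_2.sort()
--     mo_1.sort()
--
--     if mo == 1 and len(mo_1)>0:
--         return a-mo_1[0]
--     elif mo == 1 and len(mo_1)==0:
--         return 0
--     elif mo == 2 and len(mo_1)>1 and len(mo_2)>0: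
--         return max(a-mo_1[0]-mo_1[1],a-mo_2[0])
--     elif mo == 2 and len(mo_1)<=1 and len(mo_2)>0:
--         return a-mo_2[0]
--     elif mo == 2 and len(mo_1) > 1 and len(mo_2) <= 0:
--         return a-mo_1[0]-mo_1[1]
--     else:
--         return 0
-- ===== SOURCE B (Python) =====
-- def _upd2(pair, n):
--     # keep the two smallest values seen, as (smallest, second smallest); None = absent
--     a, b = pair
--     if a is None or n < a:
--         return (n, a)
--     if b is None or n < b:
--         return (a, n)
--     return (a, b)
--
--
-- def f01(nums):
--     a = sum(nums)
--     r = a % 3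
--     if r == 0:
--         return a
--     one = (None, None)  # two smallest with n % 3 == 1
--     two = (None, None)  # two smallest with n % 3 == 2
--     for n in nums:
--         m = n % 3
--         if m == 1:
--             one = _upd2(one, n)
--         elif m == 2:
--             two = _upd2(two, n)
--     cands = []
--     if r == 1:
--         if one[0] is not None:
--             cands.append(a - one[0])
--         if two[1] is not None:
--             cands.append(a - two[0] - two[1])
--     else:
--         if two[0] is not None:
--             cands.append(a - two[0])
--         if one[1] is not None:
--             cands.append(a - one[0] - one[1])
--     return max(cands) if cands else 0
-- ===== Notes on version B (the rewrite author's own statement) =====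
-- stated objective: alternative
-- what changed: Replaces A's build-two-residue-lists-then-sort approach by a single pass that tracks the two smallest mod-1 and two smallest mod-2 elements, and adds the candidate A forgot (dropping the two smallest mod-2 elements when sum%3==1).
-- intended difference: When sum(nums)%3==1 and dropping the two smallest mod-2 elements beats (or is the only way to fix) dropping the smallest mod-1 element, A returns a suboptimal value (e.g. 0 on [2,2,3], 6 on [7,2,2,2]) while B returns the true maximum divisible-by-3 subset sum (3 resp. 9), which is the function's purpose. — e.g. on f01([2, 2, 3]): A returns 0, B returns 3
import Mathlib
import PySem

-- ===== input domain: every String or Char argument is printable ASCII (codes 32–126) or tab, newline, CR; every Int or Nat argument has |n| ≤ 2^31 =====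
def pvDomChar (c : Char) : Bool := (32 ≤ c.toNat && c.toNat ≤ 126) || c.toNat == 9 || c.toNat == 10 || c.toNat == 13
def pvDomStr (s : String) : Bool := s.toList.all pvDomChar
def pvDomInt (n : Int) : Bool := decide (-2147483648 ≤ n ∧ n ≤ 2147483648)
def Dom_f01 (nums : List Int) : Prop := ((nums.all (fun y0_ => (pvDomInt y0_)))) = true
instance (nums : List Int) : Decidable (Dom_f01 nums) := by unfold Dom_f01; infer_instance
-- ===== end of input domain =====

-- B replaces A's filter-then-sort by a single pass over nums keeping the two smallest
-- mod-1 and two smallest mod-2 elements, and restores the candidate A's sum%3==1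
-- branch forgot (dropping the two smallest mod-2 elements).

-- ===== PORT A =====
def f01 (nums : List Int) : Int :=
  let a := nums.sum
  if PySem.Int.mod a 3 = 0 then a
  else
    let mo := PySem.Int.mod a 3
    -- the for-loop building mo_1 and mo_2 by .append
    let p := nums.foldl (fun (p : List Int × List Int) n =>
        if PySem.Int.mod n 3 = 1 then (p.1 ++ [n], p.2)
        else if PySem.Int.mod n 3 = 2 then (p.1, p.2 ++ [n]) else p) ([], [])
    let mo1 := PySem.List.sorted p.1 (fun x => x) false
    let mo2 := PySem.List.sorted p.2 (fun x => x) false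
    -- mo_1[0] / mo_1[1] / mo_2[0]: each access is guarded by the length test, so the
    -- .getD 0 default after pyGet? is never taken
    if mo = 1 ∧ 0 < mo1.length then a - (PySem.List.pyGet? mo1 0).getD 0
    else if mo = 1 ∧ mo1.length = 0 then 0
    else if mo = 2 ∧ 1 < mo1.length ∧ 0 < mo2.length then
      max (a - (PySem.List.pyGet? mo1 0).getD 0 - (PySem.List.pyGet? mo1 1).getD 0)
          (a - (PySem.List.pyGet? mo2 0).getD 0)
    else if mo = 2 ∧ mo1.length ≤ 1 ∧ 0 < mo2.length then a - (PySem.List.pyGet? mo2 0).getD 0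
    else if mo = 2 ∧ 1 < mo1.length ∧ mo2.length ≤ 0 then
      a - (PySem.List.pyGet? mo1 0).getD 0 - (PySem.List.pyGet? mo1 1).getD 0
    else 0

-- ===== PORT B =====
-- _upd2(pair, n): the two smallest values seen so far, None = absent
def pvUpd2 (p : Option Int × Option Int) (n : Int) : Option Int × Option Int :=
  match p with
  | (none, _) => (some n, none)          -- 'a is None': return (n, a)
  | (some a, b) =>
    if n < a then (some n, some a)
    else
      match b with
      | none => (some a, some n)         -- 'b is None': return (a, n)
      | some b' => if n < b' then (some a, some n) else (some a, some b')

def f01_alt (nums : List Int) : Int :=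
  let a := nums.sum
  let r := PySem.Int.mod a 3
  if r = 0 then a
  else
    let st := nums.foldl (fun (st : (Option Int × Option Int) × (Option Int × Option Int)) n =>
        if PySem.Int.mod n 3 = 1 then (pvUpd2 st.1 n, st.2)
        else if PySem.Int.mod n 3 = 2 then (st.1, pvUpd2 st.2 n) else st)
      ((none, none), (none, none))
    let one := st.1
    let two := st.2
    -- cands.append(...) under the is-not-None guards; two[1] ≠ None forces two[0] ≠ None,
    -- so the .getD 0 on two[0] (resp. one[0]) is never the default
    let cands : List Int :=
      (if r = 1 then
        (match one.1 with | some y => [a - y] | none => []) ++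
        (match two.2 with | some z1 => [a - two.1.getD 0 - z1] | none => [])
      else
        (match two.1 with | some z => [a - z] | none => []) ++
        (match one.2 with | some y1 => [a - one.1.getD 0 - y1] | none => []))
    (PySem.List.max? cands (fun x => x)).getD 0

-- ===== PRECONDITION & SPEC =====
-- When sum(nums)%3==1 and dropping the two smallest mod-2 elements beats (or is the only
-- way to fix) dropping the smallest mod-1 element, A returns a suboptimal value (0 on
-- [2,2,3]) while B returns the true maximum divisible-by-3 subset sum (3), the function's purpose.
def pvDCheck (a : Int) (s1 s2 : List Int) : Bool :=
  match s2 with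
  | z0 :: z1 :: _ =>
    match s1 with
    | [] => decide (a ≠ z0 + z1)
    | y :: _ => decide (z0 + z1 < y)
  | _ => false

def D_f01 (nums : List Int) : Prop :=
  PySem.Int.mod nums.sum 3 = 1 ∧
  pvDCheck nums.sum
    ((nums.filter (fun n => PySem.Int.mod n 3 == 1)).insertionSort (· ≤ ·))
    ((nums.filter (fun n => PySem.Int.mod n 3 == 2)).insertionSort (· ≤ ·)) = true
instance (nums : List Int) : Decidable (D_f01 nums) := by unfold D_f01; infer_instance

def Spec_f01 (nums : List Int) (out : Int) : Prop := ¬ D_f01 nums → out = f01_alt nums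
instance (nums : List Int) (out : Int) : Decidable (Spec_f01 nums out) := by
  unfold Spec_f01; infer_instance

def pvDiffWitness_f01 : List Int := [2, 2, 3]
def pvDiffWitnessOut_f01 : Int × Int := (0, 3)

-- ===== CLAIM (what is proved, stated in full; the proofs are below) =====
def Claim_unchanged_f01 : Prop := ∀ (nums : List Int), Dom_f01 nums → Spec_f01 nums (f01 nums)
def Claim_changed_f01 : Prop := Dom_f01 (pvDiffWitness_f01) ∧ D_f01 (pvDiffWitness_f01) ∧ f01 (pvDiffWitness_f01) = pvDiffWitnessOut_f01.1 ∧ f01_alt (pvDiffWitness_f01) = pvDiffWitnessOut_f01.2 ∧ pvDiffWitnessOut_f01.1 ≠ pvDiffWitnessOut_f01.2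
def Claim_exact_f01 : Prop := ∀ (nums : List Int), Dom_f01 nums → D_f01 nums → f01 nums ≠ f01_alt nums

-- ===== LEMMAS AND PROOFS =====

-- the two smallest values of a multiset, kept as the sorted 2-prefix
def pvIns2 (n : Int) : List Int → List Int
  | [] => [n]
  | [a] => if n < a then [n, a] else [a, n]
  | a :: b :: _ => if n < a then [n, a] else if n < b then [a, n] else [a, b]

def pvPack : List Int → Option Int × Option Int
  | [] => (none, none)
  | [x] => (some x, none)
  | x :: y :: _ => (some x, some y)

def pvG (l : List Int) : List Int := (l.insertionSort (· ≤ ·)).take 2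

lemma pvPairwiseIS (l : List Int) : (l.insertionSort (· ≤ ·)).Pairwise (· ≤ ·) := by
  have h := List.pairwise_insertionSort (r := fun a b : Int => a ≤ b) (l := l)
  simpa using h

lemma pvSortedPy_eq (l : List Int) :
    PySem.List.sorted l (fun x => x) false = l.insertionSort (· ≤ ·) := by
  refine PySem.List.eq_of_perm_of_pairwise_le_of_injective (fun x => x) (fun _ _ h => h)
    ((PySem.List.sorted_perm l _ false).trans (List.perm_insertionSort _ l).symm)
    (PySem.List.sorted_pairwise l _) ?_
  simpa using pvPairwiseIS l

lemma pvTake2_orderedInsert (c : Int) (l : List Int) (hs : l.Pairwise (· ≤ ·)) :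
    (List.orderedInsert (· ≤ ·) c l).take 2 = pvIns2 c (l.take 2) := by
  rcases l with _ | ⟨a, _ | ⟨b, t⟩⟩
  · simp [List.orderedInsert, pvIns2]
  · simp only [List.orderedInsert, pvIns2, List.take]
    split_ifs <;> simp_all <;> omega
  · have hab : a ≤ b := (List.pairwise_cons.mp hs).1 b (by simp)
    simp only [List.orderedInsert, pvIns2, List.take]
    split_ifs <;> simp_all <;> omega

lemma pvG_cons (x : Int) (l : List Int) : pvG (x :: l) = pvIns2 x (pvG l) := by
  simp only [pvG, List.insertionSort]
  exact pvTake2_orderedInsert x _ (pvPairwiseIS l)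

lemma pvG_perm {l₁ l₂ : List Int} (h : l₁.Perm l₂) : pvG l₁ = pvG l₂ := by
  unfold pvG
  congr 1
  refine PySem.List.eq_of_perm_of_pairwise_le_of_injective (fun x => x) (fun _ _ h => h)
    (((List.perm_insertionSort _ l₁).trans h).trans (List.perm_insertionSort _ l₂).symm)
    ?_ ?_
  · simpa using pvPairwiseIS l₁
  · simpa using pvPairwiseIS l₂

lemma pvFoldl_ins2 (l : List Int) (s : List Int) :
    l.foldl (fun t n => pvIns2 n t) (pvG s) = pvG (s ++ l) := by
  induction l generalizing s with
  | nil => simp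
  | cons x l ih =>
    have h1 : pvIns2 x (pvG s) = pvG (x :: s) := (pvG_cons x s).symm
    calc (x :: l).foldl (fun t n => pvIns2 n t) (pvG s)
        = l.foldl (fun t n => pvIns2 n t) (pvG (x :: s)) := by rw [List.foldl_cons, h1]
      _ = pvG ((x :: s) ++ l) := ih (x :: s)
      _ = pvG (s ++ x :: l) := pvG_perm (by simpa using List.perm_middle.symm)

lemma pvUpd2_pack (s : List Int) (n : Int) : pvUpd2 (pvPack s) n = pvPack (pvIns2 n s) := by
  rcases s with _ | ⟨a, _ | ⟨b, t⟩⟩ <;>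
    simp only [pvUpd2, pvPack, pvIns2] <;> split_ifs <;> simp_all

lemma pvFoldl_upd2 (l : List Int) (s : List Int) :
    l.foldl pvUpd2 (pvPack s) = pvPack (l.foldl (fun t n => pvIns2 n t) s) := by
  induction l generalizing s with
  | nil => simp
  | cons x l ih => rw [List.foldl_cons, pvUpd2_pack, ih, List.foldl_cons]

-- B's loop state: the packed two smallest of each residue class
lemma pvB_fold (nums : List Int) :
    nums.foldl (fun (st : (Option Int × Option Int) × (Option Int × Option Int)) n =>
        if PySem.Int.mod n 3 = 1 then (pvUpd2 st.1 n, st.2)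
        else if PySem.Int.mod n 3 = 2 then (st.1, pvUpd2 st.2 n) else st)
      ((none, none), (none, none)) =
    (pvPack (pvG (nums.filter (fun n => PySem.Int.mod n 3 == 1))),
     pvPack (pvG (nums.filter (fun n => PySem.Int.mod n 3 == 2)))) := by
  have key : ∀ (l : List Int) (s1 s2 : Option Int × Option Int),
      l.foldl (fun (st : (Option Int × Option Int) × (Option Int × Option Int)) n =>
        if PySem.Int.mod n 3 = 1 then (pvUpd2 st.1 n, st.2)
        else if PySem.Int.mod n 3 = 2 then (st.1, pvUpd2 st.2 n) else st) (s1, s2) =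
      ((l.filter (fun n => PySem.Int.mod n 3 == 1)).foldl pvUpd2 s1,
       (l.filter (fun n => PySem.Int.mod n 3 == 2)).foldl pvUpd2 s2) := by
    simp only [PySem.Int.mod_eq_emod_of_pos (by norm_num : (0:Int) < 3)]
    intro l
    induction l with
    | nil => simp
    | cons x l ih =>
      intro s1 s2
      by_cases h1 : x % 3 = 1 <;> by_cases h2 : x % 3 = 2 <;> simp [h1, h2, ih]
  have h0 : ((none, none) : Option Int × Option Int) = pvPack [] := rfl
  rw [key, h0, pvFoldl_upd2, pvFoldl_upd2]
  have hG : pvG [] = ([] : List Int) := rfl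
  rw [← hG, pvFoldl_ins2, pvFoldl_ins2]
  simp [pvG]

-- A's loop: the two residue lists are the filters
lemma pvA_fold (nums : List Int) :
    nums.foldl (fun (p : List Int × List Int) n =>
        if PySem.Int.mod n 3 = 1 then (p.1 ++ [n], p.2)
        else if PySem.Int.mod n 3 = 2 then (p.1, p.2 ++ [n]) else p) ([], []) =
    (nums.filter (fun n => PySem.Int.mod n 3 == 1),
     nums.filter (fun n => PySem.Int.mod n 3 == 2)) := by
  have key : ∀ (l : List Int) (acc1 acc2 : List Int),
      l.foldl (fun (p : List Int × List Int) n =>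
        if PySem.Int.mod n 3 = 1 then (p.1 ++ [n], p.2)
        else if PySem.Int.mod n 3 = 2 then (p.1, p.2 ++ [n]) else p) (acc1, acc2) =
      (acc1 ++ l.filter (fun n => PySem.Int.mod n 3 == 1),
       acc2 ++ l.filter (fun n => PySem.Int.mod n 3 == 2)) := by
    simp only [PySem.Int.mod_eq_emod_of_pos (by norm_num : (0:Int) < 3)]
    intro l
    induction l with
    | nil => simp
    | cons x l ih =>
      intro acc1 acc2
      by_cases h1 : x % 3 = 1 <;> by_cases h2 : x % 3 = 2 <;> simp [h1, h2, ih]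
  simpa using key nums [] []

lemma pvMaxNil : (PySem.List.max? ([] : List Int) (fun x => x)).getD 0 = 0 := rfl
lemma pvMaxOne (c : Int) : (PySem.List.max? [c] (fun x => x)).getD 0 = c := rfl
lemma pvMaxTwo (c d : Int) :
    (PySem.List.max? [c, d] (fun x => x)).getD 0 = if c < d then d else c := by
  simp only [PySem.List.max?, List.foldl]
  split_ifs <;> rfl

set_option maxHeartbeats 1000000 in
lemma pvMain (nums : List Int) (hnd : ¬ D_f01 nums) : f01 nums = f01_alt nums := by
  unfold D_f01 at hnd
  simp only [f01, f01_alt, pvA_fold, pvB_fold, pvSortedPy_eq, pvG]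
  simp only [PySem.Int.mod_eq_emod_of_pos (by norm_num : (0:Int) < 3)] at hnd ⊢
  generalize hs1 : (nums.filter (fun n => n % 3 == 1)).insertionSort (· ≤ ·) = S1 at hnd ⊢
  generalize hs2 : (nums.filter (fun n => n % 3 == 2)).insertionSort (· ≤ ·) = S2 at hnd ⊢
  generalize ha : nums.sum = a at hnd ⊢
  clear hs1 hs2 ha
  have hnn : 0 ≤ a % 3 := Int.emod_nonneg a (by norm_num)
  have hlt : a % 3 < 3 := Int.emod_lt_of_pos a (by norm_num)
  have h3 : a % 3 = 0 ∨ a % 3 = 1 ∨ a % 3 = 2 := by omega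
  rcases h3 with h | h | h <;>
    rcases S1 with _ | ⟨y0, _ | ⟨y1, t1⟩⟩ <;>
    rcases S2 with _ | ⟨z0, _ | ⟨z1, t2⟩⟩ <;>
    simp_all [pvMaxNil, pvMaxOne, pvMaxTwo, pvPack, pvDCheck, max_def] <;>
    (intros; omega)

set_option maxHeartbeats 1000000 in
lemma pvMainD (nums : List Int) (hd : D_f01 nums) : f01 nums ≠ f01_alt nums := by
  unfold D_f01 at hd
  simp only [f01, f01_alt, pvA_fold, pvB_fold, pvSortedPy_eq, pvG]
  simp only [PySem.Int.mod_eq_emod_of_pos (by norm_num : (0:Int) < 3)] at hd ⊢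
  generalize hs1 : (nums.filter (fun n => n % 3 == 1)).insertionSort (· ≤ ·) = S1 at hd ⊢
  generalize hs2 : (nums.filter (fun n => n % 3 == 2)).insertionSort (· ≤ ·) = S2 at hd ⊢
  generalize ha : nums.sum = a at hd ⊢
  clear hs1 hs2 ha
  obtain ⟨h, hchk⟩ := hd
  rcases S1 with _ | ⟨y0, _ | ⟨y1, t1⟩⟩ <;>
    rcases S2 with _ | ⟨z0, _ | ⟨z1, t2⟩⟩ <;>
    simp_all [pvMaxOne, pvMaxTwo, pvPack, pvDCheck] <;>
    omega

-- ===== VERDICT (by name: the statement is the Claim_ definition above) =====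
theorem f01_spec : Claim_unchanged_f01 := by
  intro nums _ hnd
  exact pvMain nums hnd

theorem f01_changed : Claim_changed_f01 := by
  unfold Claim_changed_f01; decide

theorem f01_tight : Claim_exact_f01 := by
  intro nums _ hd
  exact pvMainD nums hd
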